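-- pv_equiv track=rewrite | github.com/pypi-data/pypi-mirror-404 | packages/mono-cbp/mono_cbp-0.1.4.tar.gz/mono_cbp-0.1.4/mono_cbp/utils/monofind.py | split_tol
-- ===== SOURCE A (Python) =====
-- def split_tol(test_list, tol):
--     """Take a list and split it into sub-lists with similar values defined by a tolerance.
--
--     Args:
--         test_list (list): List to split
--         tol (int): Threshold tolerance
--
--     Returns:
--         list: List containing split lists
--     """
--     result = []
--     res = []
--     start = test_list[0]
--     for ele in test_list:
--         if ele - start > tol:
--             result.append(res)
--             res = []
--             start = ele
--         res.append(ele)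
--     result.append(res)
--     return result
-- ===== SOURCE B (Python) =====
-- def split_tol(test_list, tol):
--     """Split test_list into groups whose elements stay within tol of the group's first element.
--
--     Two phases: first compute the cut indices in one pass, then slice the list
--     between consecutive cuts.
--     """
--     start = test_list[0]
--     cuts = []
--     for i, ele in enumerate(test_list):
--         if ele - start > tol:
--             cuts.append(i)
--             start = ele
--     bounds = [0] + cuts + [len(test_list)]
--     return [test_list[a:b] for a, b in zip(bounds, bounds[1:])]
-- ===== Notes on version B (the rewrite author's own statement) =====
-- stated objective: alternative
-- what changed: B separates boundary detection from group building: one pass records cut indices against the resetting group start, then the list is sliced between consecutive bounds, instead of A's single pass that appends elements into a running bucket list.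
import Mathlib
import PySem

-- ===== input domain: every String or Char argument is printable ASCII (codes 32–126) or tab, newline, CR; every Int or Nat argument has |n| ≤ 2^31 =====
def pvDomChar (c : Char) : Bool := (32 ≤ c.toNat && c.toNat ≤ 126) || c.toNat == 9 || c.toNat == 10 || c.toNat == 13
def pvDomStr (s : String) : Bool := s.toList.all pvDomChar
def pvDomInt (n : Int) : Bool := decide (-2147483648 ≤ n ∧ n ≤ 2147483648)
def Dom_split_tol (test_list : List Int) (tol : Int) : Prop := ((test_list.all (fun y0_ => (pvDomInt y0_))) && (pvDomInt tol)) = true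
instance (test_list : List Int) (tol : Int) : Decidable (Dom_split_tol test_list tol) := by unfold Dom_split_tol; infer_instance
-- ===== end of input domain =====

-- B splits the work into two phases — one pass recording cut indices, then slicing
-- between consecutive cuts — instead of A's single pass appending into a running bucket
-- (objective: alternative decomposition, same cost).

-- ===== PORT A =====
def split_tol (test_list : List Int) (tol : Int) : List (List Int) :=
  match PySem.List.pyGet? test_list 0 with
  | none => []   -- test_list[0] raises IndexError on []; excluded by Pre_
  | some start0 =>
    let st := test_list.foldl
      (fun (st : List (List Int) × List Int × Int) ele =>
        if ele - st.2.2 > tol then (st.1 ++ [st.2.1], ([ele], ele))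
        else (st.1, (st.2.1 ++ [ele], st.2.2)))
      ([], ([], start0))
    st.1 ++ [st.2.1]

-- ===== PORT B =====
def split_tol_alt (test_list : List Int) (tol : Int) : List (List Int) :=
  match PySem.List.pyGet? test_list 0 with
  | none => []   -- test_list[0] raises IndexError on []; excluded by Pre_
  | some start0 =>
    let st := (PySem.List.enumerate test_list).foldl
      (fun (st : List Int × Int) p =>
        if p.2 - st.2 > tol then (st.1 ++ [p.1], p.2) else st)
      ([], start0)
    let bounds : List Int := 0 :: st.1 ++ [(test_list.length : Int)]
    (bounds.zip bounds.tail).map (fun p => PySem.List.slice test_list (some p.1) (some p.2))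

-- ===== PRECONDITION & SPEC =====
-- Pre_ excludes only the empty list, on which A's test_list[0] raises IndexError.
def Pre_split_tol (test_list : List Int) (tol : Int) : Prop := test_list ≠ []
instance (test_list : List Int) (tol : Int) : Decidable (Pre_split_tol test_list tol) := by unfold Pre_split_tol; infer_instance
def pvWitness_split_tol : List Int × Int := ([1, 2, 5, 6, 20], 2)

def Spec_split_tol (test_list : List Int) (tol : Int) (out : List (List Int)) : Prop := out = split_tol_alt test_list tol
instance (test_list : List Int) (tol : Int) (out : List (List Int)) : Decidable (Spec_split_tol test_list tol out) := by unfold Spec_split_tol; infer_instance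

-- ===== CLAIM (what is proved, stated in full; the proofs are below) =====
def Claim_equal_split_tol : Prop := ∀ (test_list : List Int) (tol : Int), Dom_split_tol test_list tol → Pre_split_tol test_list tol → Spec_split_tol test_list tol (split_tol test_list tol)

-- ===== LEMMAS AND PROOFS =====

-- Reference recursion: the groups of `l` given the current group's start value and
-- the elements `res` already collected into the current group.
def runGroups (tol : Int) : List Int → Int → List Int → List (List Int)
  | [], _, res => [res]
  | e :: rest, start, res =>
    if e - start > tol then res :: runGroups tol rest e [e]
    else runGroups tol rest start (res ++ [e])

-- A's loop computes runGroups.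
lemma splitA_loop (tol : Int) :
    ∀ (l : List Int) (start : Int) (res : List Int) (acc : List (List Int)),
    (l.foldl
      (fun (st : List (List Int) × List Int × Int) ele =>
        if ele - st.2.2 > tol then (st.1 ++ [st.2.1], ([ele], ele))
        else (st.1, (st.2.1 ++ [ele], st.2.2)))
      (acc, (res, start))).1
    ++ [(l.foldl
      (fun (st : List (List Int) × List Int × Int) ele =>
        if ele - st.2.2 > tol then (st.1 ++ [st.2.1], ([ele], ele))
        else (st.1, (st.2.1 ++ [ele], st.2.2)))
      (acc, (res, start))).2.1]
    = acc ++ runGroups tol l start res := by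
  intro l
  induction l with
  | nil => intro start res acc; simp [runGroups]
  | cons e rest ih =>
    intro start res acc
    by_cases h : e - start > tol
    · simp only [List.foldl_cons, runGroups, if_pos h]
      rw [ih]; simp
    · simp only [List.foldl_cons, runGroups, if_neg h]
      rw [ih]

-- B's first phase as a recursion over the enumerated suffix.
def cutsF (tol : Int) : List (Int × Int) → Int → List Int
  | [], _ => []
  | p :: rest, start =>
    if p.2 - start > tol then p.1 :: cutsF tol rest p.2 else cutsF tol rest start

lemma splitB_loop (tol : Int) :
    ∀ (l : List (Int × Int)) (acc : List Int) (start : Int),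
    (l.foldl
      (fun (st : List Int × Int) p =>
        if p.2 - st.2 > tol then (st.1 ++ [p.1], p.2) else st)
      (acc, start)).1 = acc ++ cutsF tol l start := by
  intro l
  induction l with
  | nil => intro acc start; simp [cutsF]
  | cons p rest ih =>
    intro acc start
    by_cases h : p.2 - start > tol
    · simp only [List.foldl_cons, cutsF, if_pos h]; rw [ih]; simp
    · simp only [List.foldl_cons, cutsF, if_neg h]; rw [ih]

-- B's second phase: slices between consecutive bounds.
def segs (tl : List Int) (bs : List Int) : List (List Int) :=
  (bs.zip bs.tail).map (fun p => PySem.List.slice tl (some p.1) (some p.2))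

lemma segs_cons_cons (tl : List Int) (a b : Int) (bs : List Int) :
    segs tl (a :: b :: bs) = PySem.List.slice tl (some a) (some b) :: segs tl (b :: bs) := by
  simp [segs]

-- The slice tl[k:j] for natural bounds.
def sliceN (tl : List Int) (k j : Nat) : List Int := (tl.drop k).take (j - k)

lemma segs_eq_run (tl : List Int) (tol : Int) :
    ∀ (suffix : List Int) (j k : Nat) (start : Int), k ≤ j → tl.drop j = suffix →
    segs tl ((k : Int) :: cutsF tol (PySem.List.enumerate suffix (j : Int)) start ++ [(tl.length : Int)])
      = runGroups tol suffix start (sliceN tl k j) := by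
  intro suffix
  induction suffix with
  | nil =>
    intro j k start hkj hdrop
    have hlen : tl.length ≤ j := by
      have := congrArg List.length hdrop
      simp [List.length_drop] at this; omega
    have h2 : segs tl [(k : Int), (tl.length : Int)]
        = [(tl.drop k).take (tl.length - k)] := by
      simp [segs, PySem.List.slice_natCast]
    simp only [PySem.List.enumerate_nil, cutsF, runGroups]
    rw [List.singleton_append, h2]
    simp only [sliceN]
    congr 1
    rw [List.take_of_length_le (by simp), List.take_of_length_le (by simp [List.length_drop]; omega)]
  | cons e rest ih =>
    intro j k start hkj hdrop
    have hjlt : j < tl.length := by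
      by_contra h
      rw [List.drop_eq_nil_of_le (by omega)] at hdrop; simp at hdrop
    have hdrop1 : tl.drop (j + 1) = rest := by
      have := congrArg List.tail hdrop
      simpa [List.tail_drop] using this
    have hget : tl[j]? = some e := by
      have h0 : (tl.drop j)[0]? = tl[j + 0]? := List.getElem?_drop
      rw [hdrop] at h0; simpa using h0.symm
    rw [PySem.List.enumerate_cons]
    by_cases h : e - start > tol
    · simp only [cutsF, if_pos h, runGroups, List.cons_append]
      rw [segs_cons_cons, PySem.List.slice_natCast]
      have hone : sliceN tl j (j + 1) = [e] := by
        simp only [sliceN, Nat.add_sub_cancel_left, hdrop]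
        simp
      have hih := ih (j + 1) j e (by omega) hdrop1
      rw [hone] at hih
      rw [show ((j : Int) + 1) = ((j + 1 : Nat) : Int) by push_cast; ring]
      simp only [List.cons_append] at hih ⊢
      rw [hih]
      simp [sliceN]
    · simp only [cutsF, runGroups, if_neg h]
      have hih := ih (j + 1) k start (by omega) hdrop1
      rw [show ((j : Int) + 1) = ((j + 1 : Nat) : Int) by push_cast; ring]
      rw [hih]
      congr 1
      simp only [sliceN]
      have hsub : j + 1 - k = (j - k) + 1 := by omega
      rw [hsub, List.take_add_one]
      congr 1
      rw [List.getElem?_drop, show k + (j - k) = j by omega, hget]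
      rfl

-- ===== VERDICT (by name: the statement is the Claim_ definition above) =====
theorem split_tol_spec : Claim_equal_split_tol := by
  intro tl tol _hDom hPre
  unfold Spec_split_tol split_tol split_tol_alt
  match tl, hPre with
  | x :: xs, _ =>
    rw [PySem.List.pyGet?_zero_cons]
    simp only
    rw [splitA_loop, splitB_loop]
    have := segs_eq_run (x :: xs) tol (x :: xs) 0 0 x (le_refl 0) (by simp)
    simp only [sliceN, Nat.sub_zero, List.drop_zero, List.take_zero] at this
    rw [show ((0 : Nat) : Int) = (0 : Int) by simp] at this
    simpa [segs] using this.symm
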